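-- pv_equiv track=rewrite | github.com/piotrhelm/NESTFUL | data_v2/executable_functions/py_code_file_1225.py | group_zeros_and_ones
-- ===== SOURCE A (Python) =====
-- from typing import List
--
-- def group_zeros_and_ones(input_list: List[int]) -> List[int]:
--
--     """Groups all the 0's together and all the 1's together in a list.
--
--
--
--     Args:
--
--         input_list: A list of 0's and 1's.
--
--
--
--     Returns:
--
--         A list of 0's and 1's with all the 0's grouped together and all the 1's grouped together.
--
--     """
--
--     zeros = []
--
--     ones = []
--
--     for num in input_list:
--
--         if num == 0:
--
--             zeros.append(num)
--
--         else:
--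
--             ones.append(num)
--
--     return zeros + ones
-- ===== SOURCE B (Python) =====
-- from typing import List
--
-- def group_zeros_and_ones(input_list: List[int]) -> List[int]:
--     return [0] * input_list.count(0) + [x for x in input_list if x != 0]
-- ===== Notes on version B (the rewrite author's own statement) =====
-- stated objective: idiomatic
-- what changed: Replaced the two-accumulator partition loop with a count of the zeros plus a filter comprehension: a replicated run of zeros followed by the non-zero elements in their original order.
import Mathlib
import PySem

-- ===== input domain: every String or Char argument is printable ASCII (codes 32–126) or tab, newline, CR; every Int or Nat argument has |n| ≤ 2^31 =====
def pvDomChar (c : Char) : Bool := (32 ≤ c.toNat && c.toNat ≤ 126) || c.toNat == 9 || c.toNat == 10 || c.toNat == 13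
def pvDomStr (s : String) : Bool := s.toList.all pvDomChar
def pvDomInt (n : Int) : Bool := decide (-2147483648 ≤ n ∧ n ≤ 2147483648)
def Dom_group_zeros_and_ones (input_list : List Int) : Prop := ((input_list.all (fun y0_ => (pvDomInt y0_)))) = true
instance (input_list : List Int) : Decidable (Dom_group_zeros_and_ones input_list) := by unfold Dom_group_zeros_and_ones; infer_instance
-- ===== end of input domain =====

-- B replaces A's two-accumulator partition loop with count-of-zeros + a filter ([0]*count ++ non-zeros), more idiomatic.

-- ===== PORT A =====
def group_zeros_and_ones (input_list : List Int) : List Int :=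
  let p := input_list.foldl
    (fun (p : List Int × List Int) num =>
      if num == 0 then (p.1 ++ [num], p.2) else (p.1, p.2 ++ [num]))
    ([], [])
  p.1 ++ p.2

-- ===== PORT B =====
def group_zeros_and_ones_alt (input_list : List Int) : List Int :=
  List.replicate (PySem.List.count input_list 0) 0 ++ input_list.filter (fun x => x != 0)

-- ===== PRECONDITION & SPEC =====
def Spec_group_zeros_and_ones (input_list : List Int) (out : List Int) : Prop := out = group_zeros_and_ones_alt input_list
instance (input_list : List Int) (out : List Int) : Decidable (Spec_group_zeros_and_ones input_list out) := by unfold Spec_group_zeros_and_ones; infer_instance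

-- ===== CLAIM (what is proved, stated in full; the proofs are below) =====
def Claim_equal_group_zeros_and_ones : Prop := ∀ (input_list : List Int), Dom_group_zeros_and_ones input_list → Spec_group_zeros_and_ones input_list (group_zeros_and_ones input_list)

-- ===== LEMMAS AND PROOFS =====
theorem gzao_foldl (l zs os : List Int) :
    l.foldl
      (fun (p : List Int × List Int) num =>
        if num = 0 then (p.1 ++ [num], p.2) else (p.1, p.2 ++ [num]))
      (zs, os)
    = (zs ++ List.replicate (l.count 0) 0, os ++ l.filter (fun x => x != 0)) := by
  induction l generalizing zs os with
  | nil => simp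
  | cons a t ih =>
    by_cases h : a = 0
    · subst h
      simp only [List.foldl_cons, ih]
      simp [List.replicate_succ]
    · simp only [List.foldl_cons, if_neg h, ih]
      simp [h]

-- ===== VERDICT (by name: the statement is the Claim_ definition above) =====
theorem group_zeros_and_ones_spec : Claim_equal_group_zeros_and_ones := by
  intro l _
  show _ = _
  simp only [group_zeros_and_ones, group_zeros_and_ones_alt, PySem.List.count]
  simp only [beq_iff_eq]
  rw [gzao_foldl]
  simp
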